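-- pv_equiv track=rewrite | github.com/asifhussain60/CORTEX | src/cortex_agents/test_generator/parametrized_test_generator.py | _generate_strategy_code
-- ===== SOURCE A (Python) =====
-- from typing import List, Dict, Any, Tuple, Optional
--
-- def _generate_strategy_code(parameters: List[Dict[str, Any]]) -> str:
--     """Generate Hypothesis strategy code for parameters."""
--     if not parameters:
--         return ""
--
--     strategies = []
--
--     for param in parameters:
--         param_type = param.get("type", "Any")
--         param_name = param["name"]
--
--         if param_type == "int":
--             strategies.append(f"{param_name}=st.integers()")
--         elif param_type == "float":
--             strategies.append(f"{param_name}=st.floats(allow_nan=False, allow_infinity=False)")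
--         elif param_type == "str":
--             strategies.append(f"{param_name}=st.text()")
--         elif param_type in ["list", "List"]:
--             strategies.append(f"{param_name}=st.lists(st.integers())")
--         elif param_type in ["dict", "Dict"]:
--             strategies.append(f"{param_name}=st.dictionaries(st.text(), st.integers())")
--         elif param_type == "bool":
--             strategies.append(f"{param_name}=st.booleans()")
--         else:
--             strategies.append(f"{param_name}=st.none()")  # Fallback
--
--     return ", ".join(strategies)
-- ===== SOURCE B (Python) =====
-- _RULES = [
--     (("int",), "st.integers()"),
--     (("float",), "st.floats(allow_nan=False, allow_infinity=False)"),
--     (("str",), "st.text()"),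
--     (("list", "List"), "st.lists(st.integers())"),
--     (("dict", "Dict"), "st.dictionaries(st.text(), st.integers())"),
--     (("bool",), "st.booleans()"),
-- ]
--
--
-- def _template(param_type):
--     """Scan the rule list; each rule may match several type spellings."""
--     for keys, template in _RULES:
--         if param_type in keys:
--             return template
--     return "st.none()"
--
--
-- def _generate_strategy_code(parameters):
--     """Build the joined string back-to-front with a string accumulator (no join, no list)."""
--     out = ""
--     for param in reversed(parameters):
--         piece = param["name"] + "=" + _template(param.get("type", "Any"))
--         out = piece if not out else piece + ", " + out
--     return out
-- ===== Notes on version B (the rewrite author's own statement) =====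
-- stated objective: alternative
-- what changed: Replaced A's forward accumulate-into-list-then-join with a backwards traversal that builds the result string directly via a string accumulator (separator inserted by the recursion itself, no list and no join), and replaced the if/elif cascade with a scan over a rule list whose entries match several type spellings.
import Mathlib
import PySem

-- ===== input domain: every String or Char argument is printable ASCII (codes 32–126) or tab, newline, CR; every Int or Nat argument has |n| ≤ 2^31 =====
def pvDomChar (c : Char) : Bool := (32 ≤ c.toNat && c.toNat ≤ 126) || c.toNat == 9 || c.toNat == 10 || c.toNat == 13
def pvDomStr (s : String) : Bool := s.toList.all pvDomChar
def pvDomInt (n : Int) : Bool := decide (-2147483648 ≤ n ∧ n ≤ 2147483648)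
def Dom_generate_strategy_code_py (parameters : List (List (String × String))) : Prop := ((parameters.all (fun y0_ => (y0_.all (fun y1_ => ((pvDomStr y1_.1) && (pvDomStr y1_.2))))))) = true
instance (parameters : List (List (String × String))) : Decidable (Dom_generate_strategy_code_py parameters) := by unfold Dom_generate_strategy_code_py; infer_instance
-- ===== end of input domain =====

-- B builds the joined string back-to-front with a string accumulator (no intermediate list, no join)
-- and finds each template by scanning a rule list; alternative decomposition, same cost. Return-value
-- equivalence only.


-- ===== PORT A =====
-- A's per-parameter if/elif cascade (param["name"] lookup is total only under Pre_; the
-- .getD "" default is never reached on admitted inputs).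
def pvCascade (param : List (String × String)) : String :=
  let param_type := (param.lookup "type").getD "Any"
  let param_name := (param.lookup "name").getD ""
  if param_type = "int" then param_name ++ "=st.integers()"
  else if param_type = "float" then param_name ++ "=st.floats(allow_nan=False, allow_infinity=False)"
  else if param_type = "str" then param_name ++ "=st.text()"
  else if param_type = "list" ∨ param_type = "List" then param_name ++ "=st.lists(st.integers())"
  else if param_type = "dict" ∨ param_type = "Dict" then param_name ++ "=st.dictionaries(st.text(), st.integers())"
  else if param_type = "bool" then param_name ++ "=st.booleans()"
  else param_name ++ "=st.none()"

def generate_strategy_code_py (parameters : List (List (String × String))) : String :=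
  if parameters = [] then ""
  else
    let strategies := parameters.foldl (fun acc param => acc ++ [pvCascade param]) []
    PySem.Str.join ", " strategies

-- ===== PORT B =====
def pvRules : List (List String × String) :=
  [(["int"], "st.integers()"),
   (["float"], "st.floats(allow_nan=False, allow_infinity=False)"),
   (["str"], "st.text()"),
   (["list", "List"], "st.lists(st.integers())"),
   (["dict", "Dict"], "st.dictionaries(st.text(), st.integers())"),
   (["bool"], "st.booleans()")]

-- _template: scan the rule list for the first rule whose key set contains the type
def pvTemplate : List (List String × String) → String → String
  | [], _ => "st.none()"
  | (keys, tpl) :: rest, t => if t ∈ keys then tpl else pvTemplate rest t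

def pvPiece (param : List (String × String)) : String :=
  (param.lookup "name").getD "" ++ "=" ++ pvTemplate pvRules ((param.lookup "type").getD "Any")

-- reversed traversal with a string accumulator = foldr over the list
def generate_strategy_code_py_alt (parameters : List (List (String × String))) : String :=
  parameters.foldr
    (fun param out =>
      let piece := pvPiece param
      if out = "" then piece else piece ++ ", " ++ out) ""

-- ===== PRECONDITION & SPEC =====
-- Pre_ excludes parameter dicts without a "name" key, on which the Python A raises KeyError
-- (B raises there too).
def Pre_generate_strategy_code_py (parameters : List (List (String × String))) : Prop :=
  (parameters.all (fun param => (param.lookup "name").isSome)) = true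
instance (parameters : List (List (String × String))) : Decidable (Pre_generate_strategy_code_py parameters) := by unfold Pre_generate_strategy_code_py; infer_instance

def pvWitness_generate_strategy_code_py : (List (List (String × String))) :=
  [[("name", "x"), ("type", "int")], [("name", "y")]]

def Spec_generate_strategy_code_py (parameters : List (List (String × String))) (out : String) : Prop := out = generate_strategy_code_py_alt parameters
instance (parameters : List (List (String × String))) (out : String) : Decidable (Spec_generate_strategy_code_py parameters out) := by unfold Spec_generate_strategy_code_py; infer_instance

-- ===== CLAIM =====
def Claim_equal_generate_strategy_code_py : Prop := ∀ (parameters : List (List (String × String))), Dom_generate_strategy_code_py parameters → Pre_generate_strategy_code_py parameters → Spec_generate_strategy_code_py parameters (generate_strategy_code_py parameters)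

-- ===== LEMMAS AND PROOFS =====

-- A's cascade agrees pointwise with B's rule-list scan
theorem pvCascade_eq_piece (param : List (String × String)) :
    pvCascade param = pvPiece param := by
  unfold pvCascade pvPiece
  set t := (param.lookup "type").getD "Any" with ht
  set n := (param.lookup "name").getD "" with hn
  by_cases h1 : t = "int"
  · simp [h1, pvRules, pvTemplate, String.append_assoc]
  by_cases h2 : t = "float"
  · simp [h2, pvRules, pvTemplate, String.append_assoc]
  by_cases h3 : t = "str"
  · simp [h3, pvRules, pvTemplate, String.append_assoc]
  by_cases h4 : t = "list"
  · simp [h4, pvRules, pvTemplate, String.append_assoc]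
  by_cases h5 : t = "List"
  · simp [h5, pvRules, pvTemplate, String.append_assoc]
  by_cases h6 : t = "dict"
  · simp [h6, pvRules, pvTemplate, String.append_assoc]
  by_cases h7 : t = "Dict"
  · simp [h7, pvRules, pvTemplate, String.append_assoc]
  by_cases h8 : t = "bool"
  · simp [h8, pvRules, pvTemplate, String.append_assoc]
  · simp [h1, h2, h3, h4, h5, h6, h7, h8, pvRules, pvTemplate, String.append_assoc]

-- every piece is a nonempty string (it contains '=')
theorem pvPiece_ne_empty (param : List (String × String)) : pvPiece param ≠ "" := by
  unfold pvPiece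
  intro h
  have h0 : (((param.lookup "name").getD "" ++ "=" ++
      pvTemplate pvRules ((param.lookup "type").getD "Any")).toList).length = 0 := by
    rw [h]; rfl
  simp at h0

-- the join of a nonempty list of strings is at least as long as its head
theorem pvJoin_head_le (x : String) (xs : List String) :
    x.toList.length ≤ (PySem.Str.join ", " (x :: xs)).toList.length := by
  cases xs with
  | nil => simp [PySem.Str.join, PySem.Chars.join, List.intercalate]
  | cons y ys => simp [PySem.Str.join, PySem.Chars.join, List.intercalate]

-- peel the head off a join of two or more strings
theorem pvJoin_cons_cons (x y : String) (ys : List String) :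
    PySem.Str.join ", " (x :: y :: ys) = x ++ ", " ++ PySem.Str.join ", " (y :: ys) := by
  apply String.toList_injective
  simp [PySem.Str.join, PySem.Chars.join, List.intercalate]

-- A's accumulating foldl is the map of the cascade
theorem pvFoldl_eq_map (l : List (List (String × String))) (acc : List String) :
    l.foldl (fun acc param => acc ++ [pvCascade param]) acc = acc ++ l.map pvCascade := by
  induction l generalizing acc with
  | nil => simp
  | cons p rest ih => simp [List.foldl, ih]

-- B's backwards string build equals the join of the pieces
theorem pvFoldr_eq_join (l : List (List (String × String))) :
    l.foldr (fun param out =>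
        let piece := pvPiece param
        if out = "" then piece else piece ++ ", " ++ out) "" =
      PySem.Str.join ", " (l.map pvPiece) := by
  induction l with
  | nil => rfl
  | cons p rest ih =>
    cases rest with
    | nil =>
      simp [PySem.Str.join, PySem.Chars.join, List.intercalate]
    | cons q qs =>
      simp only [List.foldr, List.map] at ih ⊢
      rw [ih]
      have hne : PySem.Str.join ", " (pvPiece q :: qs.map pvPiece) ≠ "" := by
        intro h
        have hle := pvJoin_head_le (pvPiece q) (qs.map pvPiece)
        rw [h] at hle
        exact pvPiece_ne_empty q (String.toList_injective (by
          simpa using Nat.le_antisymm hle (Nat.zero_le _)))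
      rw [if_neg hne, pvJoin_cons_cons]

-- ===== VERDICT =====
theorem generate_strategy_code_py_spec : Claim_equal_generate_strategy_code_py := by
  intro parameters _ _
  unfold Spec_generate_strategy_code_py generate_strategy_code_py generate_strategy_code_py_alt
  rw [pvFoldr_eq_join]
  by_cases hnil : parameters = []
  · subst hnil; rfl
  · rw [if_neg hnil, pvFoldl_eq_map]
    simp only [List.nil_append]
    exact congrArg _ (List.map_congr_left (fun p _ => (pvCascade_eq_piece p).symm)).symm
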